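-- pv_equiv track=rewrite | github.com/adamyedidia/thesis | friedman.py | reduces
-- ===== SOURCE A (Python) =====
-- def hasAnEdge(kSet1, kSet2, legalOrdering):
-- #  print kSet1, kSet2, legalOrdering
--   if (len(kSet1) == 0) and (len(kSet2) == 0):
--     return True
--
--   if (len(kSet1) > 0) and (len(kSet2) == 0) and (not 1 in legalOrdering):
--     return True
--
--   if (len(kSet1) == 0) and (len(kSet2) > 0) and (not -1 in legalOrdering):
--     return True
--
--   if ((kSet1[0] < kSet2[0]) and (legalOrdering[0] == -1)):
--     return hasAnEdge(kSet1[1:], kSet2, legalOrdering[1:])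
--
--   if ((kSet1[0] > kSet2[0]) and (legalOrdering[0] == 1)):
--     return hasAnEdge(kSet1, kSet2[1:], legalOrdering[1:])
--
--   if ((kSet1[0] == kSet2[0]) and (legalOrdering[0] == 0)):
--     return hasAnEdge(kSet1[1:], kSet2[1:], legalOrdering[1:])
--
--   return False
--
-- def reduces(set1, set2, legalOrdering):
--   for y in set1:
--     if (not (y in set2)):
--       returningFalse = True
--
--       for x in set2:
--         if (hasAnEdge(x, y, legalOrdering) or hasAnEdge(y, x, legalOrdering)) \
--           and friedmanMax(x) <= friedmanMax(y):
--           returningFalse = False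
--
--       if returningFalse:
--         return False
--
--   return True
--
-- def friedmanMax(set):
--   if set == []:
--     return 0
--   else:
--     return max(set)
-- ===== SOURCE B (Python) =====
-- def hasAnEdge(kSet1, kSet2, legalOrdering):
--   # iterative: three indices into the unchanged lists instead of recursion on suffixes
--   i1 = i2 = il = 0
--   n1, n2 = len(kSet1), len(kSet2)
--   while True:
--     r1, r2 = n1 - i1, n2 - i2
--     if r1 == 0 and r2 == 0:
--       return True
--     if r1 > 0 and r2 == 0 and 1 not in legalOrdering[il:]:
--       return True
--     if r1 == 0 and r2 > 0 and -1 not in legalOrdering[il:]: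
--       return True
--     a = kSet1[i1]
--     b = kSet2[i2]
--     c = legalOrdering[il]
--     if a < b and c == -1:
--       i1 += 1; il += 1
--     elif a > b and c == 1:
--       i2 += 1; il += 1
--     elif a == b and c == 0:
--       i1 += 1; i2 += 1; il += 1
--     else:
--       return False
--
-- def friedmanMax(set):
--   return max(set, default=0)
--
-- def reduces(set1, set2, legalOrdering):
--   return all(
--     any((hasAnEdge(x, y, legalOrdering) or hasAnEdge(y, x, legalOrdering))
--         and friedmanMax(x) <= friedmanMax(y)
--         for x in set2)
--     for y in set1 if y not in set2)
-- ===== Notes on version B (the rewrite author's own statement) =====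
-- stated objective: idiomatic
-- what changed: hasAnEdge becomes an iterative index-walk (three cursors into the unchanged lists) instead of recursion on list slices, friedmanMax uses max(..., default=0), and the outer flag-driven nested loops become an all/any comprehension; Pre_ excludes exactly the inputs on which A raises IndexError (stated arithmetically over the forced comparison trace), and B matches A on every input A returns.
import Mathlib
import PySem

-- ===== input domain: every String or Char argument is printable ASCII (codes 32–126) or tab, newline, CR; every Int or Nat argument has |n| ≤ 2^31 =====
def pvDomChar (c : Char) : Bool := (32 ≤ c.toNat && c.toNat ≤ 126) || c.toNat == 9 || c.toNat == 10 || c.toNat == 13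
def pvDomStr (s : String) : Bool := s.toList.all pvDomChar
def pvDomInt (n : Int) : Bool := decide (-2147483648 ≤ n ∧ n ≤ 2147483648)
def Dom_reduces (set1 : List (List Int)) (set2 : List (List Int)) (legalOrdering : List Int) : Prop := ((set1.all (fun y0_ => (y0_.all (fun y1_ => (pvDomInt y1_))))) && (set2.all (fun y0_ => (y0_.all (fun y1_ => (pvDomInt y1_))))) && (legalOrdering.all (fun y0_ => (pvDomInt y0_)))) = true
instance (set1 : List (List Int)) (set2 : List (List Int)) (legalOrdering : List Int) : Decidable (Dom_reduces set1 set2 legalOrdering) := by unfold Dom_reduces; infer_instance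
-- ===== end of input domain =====

-- B rewrites A's recursive hasAnEdge as an iterative index walk, friedmanMax via max(..., default=0),
-- and the flag-driven nested loops as an all/any comprehension (idiomatic; same cost).

-- ===== PORT A =====
-- recursion on list suffixes, exactly as A's hasAnEdge; the `| _, _, _ => false` arm is where
-- Python raises IndexError (those inputs are excluded by Pre_reduces)
def edgeA (k1 k2 L : List Int) : Bool :=
  if k1.length = 0 ∧ k2.length = 0 then true
  else if 0 < k1.length ∧ k2.length = 0 ∧ (1 : Int) ∉ L then true
  else if k1.length = 0 ∧ 0 < k2.length ∧ (-1 : Int) ∉ L then true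
  else
    match k1, k2, L with
    | a :: t1, b :: t2, c :: tl =>
      if a < b ∧ c = -1 then edgeA t1 (b :: t2) tl
      else if a > b ∧ c = 1 then edgeA (a :: t1) t2 tl
      else if a = b ∧ c = 0 then edgeA t1 t2 tl
      else false
    | _, _, _ => false
termination_by k1.length + k2.length
decreasing_by all_goals (simp; try omega)

-- friedmanMax: `max(set)` on a nonempty list (the [] branch returns 0 first)
def fmaxA (s : List Int) : Int :=
  if s = [] then 0 else (PySem.List.max? s (fun x => x)).getD 0

-- the outer `for y in set1` loop with its early `return False`
def redGoA (set2 : List (List Int)) (L : List Int) : List (List Int) → Bool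
  | [] => true
  | y :: rest =>
    if y ∈ set2 then redGoA set2 L rest
    else
      let returningFalse := set2.foldl
        (fun rf x => if ((edgeA x y L || edgeA y x L) && decide (fmaxA x ≤ fmaxA y)) then false else rf) true
      if returningFalse then false else redGoA set2 L rest

def reduces (set1 : List (List Int)) (set2 : List (List Int)) (legalOrdering : List Int) : Bool :=
  redGoA set2 legalOrdering set1

-- ===== PORT B =====
-- Source B's while-True loop: three cursors i1 i2 il into the unchanged lists; kSet1[i1] etc. is
-- `k1[i1]?` (nonnegative index; none = IndexError, the `| _, _, _ => false` arm, outside Pre_),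
-- and legalOrdering[il:] with il ≥ 0 is `L.drop il` (exact for a nonnegative lower slice bound)
def edgeBGo (k1 k2 L : List Int) (i1 i2 il : Nat) : Bool :=
  if k1.length - i1 = 0 ∧ k2.length - i2 = 0 then true
  else if 0 < k1.length - i1 ∧ k2.length - i2 = 0 ∧ (1 : Int) ∉ L.drop il then true
  else if k1.length - i1 = 0 ∧ 0 < k2.length - i2 ∧ (-1 : Int) ∉ L.drop il then true
  else
    match h1 : k1[i1]?, h2 : k2[i2]?, h3 : L[il]? with
    | some a, some b, some c =>
      if a < b ∧ c = -1 then edgeBGo k1 k2 L (i1 + 1) i2 (il + 1)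
      else if a > b ∧ c = 1 then edgeBGo k1 k2 L i1 (i2 + 1) (il + 1)
      else if a = b ∧ c = 0 then edgeBGo k1 k2 L (i1 + 1) (i2 + 1) (il + 1)
      else false
    | _, _, _ => false
termination_by (k1.length - i1) + (k2.length - i2)
decreasing_by
  · have := (List.getElem?_eq_some_iff.mp h1).1; omega
  · have := (List.getElem?_eq_some_iff.mp h2).1; omega
  · have := (List.getElem?_eq_some_iff.mp h1).1; omega

def edgeB (k1 k2 L : List Int) : Bool := edgeBGo k1 k2 L 0 0 0

def fmaxB (s : List Int) : Int := PySem.List.maxD s (fun x => x) 0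

def reduces_alt (set1 : List (List Int)) (set2 : List (List Int)) (legalOrdering : List Int) : Bool :=
  (set1.filter (fun y => !(set2.contains y))).all
    (fun y => set2.any
      (fun x => (edgeB x y legalOrdering || edgeB y x legalOrdering) && decide (fmaxB x ≤ fmaxB y)))

-- ===== PRECONDITION & SPEC =====
-- Closed-form description of hasAnEdge's forced walk (used only by Pre_reduces, not by the ports):
-- after i accepted steps on ordering L, pvC1/pvC2 count how many elements of kSet1/kSet2 were
-- consumed (a -1 or 0 step consumes from kSet1, a 1 or 0 step from kSet2); pvMatch says step i's
-- comparison agrees with L's signal; pvRaise/pvFalseAt say the walk ends in an IndexError / in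
-- `return False`; pvOk/pvSafe mirror the inner loop's flag and its raise-freedom; Pre_reduces
-- quantifies over positions of set1 up to the first y that makes A `return False`.
def pvC1 (L : List Int) (s : Nat) : Nat := (L.take s).countP (fun c => c == -1 || c == 0)
def pvC2 (L : List Int) (s : Nat) : Nat := (L.take s).countP (fun c => c == 1 || c == 0)
def pvMatch (x y L : List Int) (i : Nat) : Bool :=
  let a := x.getD (pvC1 L i) 0
  let b := y.getD (pvC2 L i) 0
  let c := L.getD i 0
  (c == -1 && decide (a < b)) || (c == 1 && decide (b < a)) || (c == 0 && a == b)
def pvValid (x y L : List Int) (i : Nat) : Bool :=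
  decide (pvC1 L i < x.length) && decide (pvC2 L i < y.length) && decide (i < L.length)
def pvPref (x y L : List Int) (j : Nat) : Bool :=
  (List.range j).all (fun i => pvValid x y L i && pvMatch x y L i)
def pvRaise (x y L : List Int) : Bool :=
  (List.range (L.length + 1)).any (fun j => pvPref x y L j &&
    ((decide (pvC1 L j < x.length) && decide (pvC2 L j = y.length) && (L.drop j).contains 1) ||
     (decide (pvC1 L j = x.length) && decide (pvC2 L j < y.length) && (L.drop j).contains (-1)) ||
     (decide (pvC1 L j < x.length) && decide (pvC2 L j < y.length) && decide (j = L.length))))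
def pvFalseAt (x y L : List Int) : Bool :=
  (List.range L.length).any (fun j => pvPref x y L j && pvValid x y L j && !pvMatch x y L j)
def pvEdgeTrue (x y L : List Int) : Bool := !pvRaise x y L && !pvFalseAt x y L
def pvFmax (s : List Int) : Int :=
  match s with
  | [] => 0
  | h :: t => t.foldl max h
def pvOk (y : List Int) (s2 : List (List Int)) (L : List Int) : Bool :=
  s2.any (fun x => (pvEdgeTrue x y L || (pvFalseAt x y L && pvEdgeTrue y x L)) &&
                   decide (pvFmax x ≤ pvFmax y))
def pvSafe (y : List Int) (s2 : List (List Int)) (L : List Int) : Bool :=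
  s2.all (fun x => !pvRaise x y L && (!pvFalseAt x y L || !pvRaise y x L))
-- Pre_reduces excludes exactly the inputs on which A raises IndexError (a reachable hasAnEdge walk
-- exhausts a tuple while the opposite signal remains in the rest of legalOrdering, or exhausts
-- legalOrdering with both tuples nonempty); on every input on which A returns, Pre_reduces holds.
def Pre_reduces (set1 : List (List Int)) (set2 : List (List Int)) (legalOrdering : List Int) : Prop :=
  ((List.range set1.length).all (fun k =>
     !((List.range k).all (fun k' => set2.contains (set1.getD k' []) || pvOk (set1.getD k' []) set2 legalOrdering))
     || set2.contains (set1.getD k []) || pvSafe (set1.getD k []) set2 legalOrdering)) = true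
instance (set1 : List (List Int)) (set2 : List (List Int)) (legalOrdering : List Int) : Decidable (Pre_reduces set1 set2 legalOrdering) := by unfold Pre_reduces; infer_instance

def pvWitness_reduces : List (List Int) × List (List Int) × List Int := ([[1]], [[2]], [1])

def Spec_reduces (set1 : List (List Int)) (set2 : List (List Int)) (legalOrdering : List Int) (out : Bool) : Prop := out = reduces_alt set1 set2 legalOrdering
instance (set1 : List (List Int)) (set2 : List (List Int)) (legalOrdering : List Int) (out : Bool) : Decidable (Spec_reduces set1 set2 legalOrdering out) := by unfold Spec_reduces; infer_instance

-- ===== CLAIM (what is proved, stated in full; the proofs are below) =====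
def Claim_equal_reduces : Prop := ∀ (set1 : List (List Int)) (set2 : List (List Int)) (legalOrdering : List Int), Dom_reduces set1 set2 legalOrdering → Pre_reduces set1 set2 legalOrdering → Spec_reduces set1 set2 legalOrdering (reduces set1 set2 legalOrdering)

-- ===== LEMMAS AND PROOFS =====

-- B's cursor walk computes A's suffix recursion (on every input, including the raise states,
-- which both ports map to `false`; Pre_reduces is therefore not needed below)
theorem edgeBGo_eq_edgeA (k1 k2 L : List Int) (i1 i2 il : Nat) :
    edgeBGo k1 k2 L i1 i2 il = edgeA (List.drop i1 k1) (List.drop i2 k2) (List.drop il L) := by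
  fun_induction edgeBGo k1 k2 L i1 i2 il with
  | case1 i1 i2 il h =>
    rw [edgeA.eq_def]; simp [List.length_drop, h.1, h.2]
  | case2 i1 i2 il hn1 h =>
    have hz : ¬(k1.length - i1 = 0) := by omega
    have hlt : i1 < k1.length := by omega
    rw [edgeA.eq_def]; simp [List.length_drop, hz, hlt, h.2.1, h.2.2]
  | case3 i1 i2 il hn1 hn2 h =>
    have hz : ¬(k2.length - i2 = 0) := by omega
    have hlt : i2 < k2.length := by omega
    rw [edgeA.eq_def]; simp [List.length_drop, hz, hlt, h.1, h.2.2]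
  | case4 i1 i2 il hn1 hn2 hn3 a b c h1 h2 h3 hc ih =>
    obtain ⟨hl1, he1⟩ := List.getElem?_eq_some_iff.mp h1
    obtain ⟨hl2, he2⟩ := List.getElem?_eq_some_iff.mp h2
    obtain ⟨hl3, he3⟩ := List.getElem?_eq_some_iff.mp h3
    have e1 : List.drop i1 k1 = a :: List.drop (i1+1) k1 := by rw [List.drop_eq_getElem_cons hl1, he1]
    have e2 : List.drop i2 k2 = b :: List.drop (i2+1) k2 := by rw [List.drop_eq_getElem_cons hl2, he2]
    have e3 : List.drop il L = c :: List.drop (il+1) L := by rw [List.drop_eq_getElem_cons hl3, he3]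
    rw [e2] at ih
    rw [e1, e2, e3, edgeA.eq_def]
    simp [hc.1, hc.2, ih]
  | case5 i1 i2 il hn1 hn2 hn3 a b c h1 h2 h3 hc1 hc ih =>
    obtain ⟨hl1, he1⟩ := List.getElem?_eq_some_iff.mp h1
    obtain ⟨hl2, he2⟩ := List.getElem?_eq_some_iff.mp h2
    obtain ⟨hl3, he3⟩ := List.getElem?_eq_some_iff.mp h3
    have e1 : List.drop i1 k1 = a :: List.drop (i1+1) k1 := by rw [List.drop_eq_getElem_cons hl1, he1]
    have e2 : List.drop i2 k2 = b :: List.drop (i2+1) k2 := by rw [List.drop_eq_getElem_cons hl2, he2]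
    have e3 : List.drop il L = c :: List.drop (il+1) L := by rw [List.drop_eq_getElem_cons hl3, he3]
    rw [e1] at ih
    rw [e1, e2, e3, edgeA.eq_def]
    simp [hc.1, hc.2, ih]
  | case6 i1 i2 il hn1 hn2 hn3 a b c h1 h2 h3 hc1 hc2 hc ih =>
    obtain ⟨hl1, he1⟩ := List.getElem?_eq_some_iff.mp h1
    obtain ⟨hl2, he2⟩ := List.getElem?_eq_some_iff.mp h2
    obtain ⟨hl3, he3⟩ := List.getElem?_eq_some_iff.mp h3
    have e1 : List.drop i1 k1 = a :: List.drop (i1+1) k1 := by rw [List.drop_eq_getElem_cons hl1, he1]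
    have e2 : List.drop i2 k2 = b :: List.drop (i2+1) k2 := by rw [List.drop_eq_getElem_cons hl2, he2]
    have e3 : List.drop il L = c :: List.drop (il+1) L := by rw [List.drop_eq_getElem_cons hl3, he3]
    rw [e1, e2, e3, edgeA.eq_def]
    simp [hc.1, hc.2, ih]
  | case7 i1 i2 il hn1 hn2 hn3 a b c h1 h2 h3 hc1 hc2 hc3 =>
    obtain ⟨hl1, he1⟩ := List.getElem?_eq_some_iff.mp h1
    obtain ⟨hl2, he2⟩ := List.getElem?_eq_some_iff.mp h2
    obtain ⟨hl3, he3⟩ := List.getElem?_eq_some_iff.mp h3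
    have e1 : List.drop i1 k1 = a :: List.drop (i1+1) k1 := by rw [List.drop_eq_getElem_cons hl1, he1]
    have e2 : List.drop i2 k2 = b :: List.drop (i2+1) k2 := by rw [List.drop_eq_getElem_cons hl2, he2]
    have e3 : List.drop il L = c :: List.drop (il+1) L := by rw [List.drop_eq_getElem_cons hl3, he3]
    rw [e1, e2, e3, edgeA.eq_def]
    simp [hc1, hc2, hc3]
  | case8 i1 i2 il hn1 hn2 hn3 hnone =>
    rw [edgeA.eq_def]
    have hor : k1.length ≤ i1 ∨ k2.length ≤ i2 ∨ L.length ≤ il := by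
      rcases Nat.lt_or_ge i1 k1.length with c1 | c1
      · rcases Nat.lt_or_ge i2 k2.length with c2 | c2
        · rcases Nat.lt_or_ge il L.length with c3 | c3
          · exact (hnone _ _ _ (List.getElem?_eq_some_iff.mpr ⟨c1, rfl⟩)
              (List.getElem?_eq_some_iff.mpr ⟨c2, rfl⟩)
              (List.getElem?_eq_some_iff.mpr ⟨c3, rfl⟩)).elim
          · exact Or.inr (Or.inr c3)
        · exact Or.inr (Or.inl c2)
      · exact Or.inl c1
    rcases hor with hge | hge | hge
    · have h2 : ¬(k2.length - i2 = 0) := fun h => hn1 ⟨by omega, h⟩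
      have hm : (-1 : Int) ∈ List.drop il L := by
        by_contra hm; exact hn3 ⟨by omega, by omega, hm⟩
      rw [List.drop_eq_nil_of_le hge]
      simp [List.length_drop, h2, hm]
    · have h1 : ¬(k1.length - i1 = 0) := fun h => hn1 ⟨h, by omega⟩
      have hm : (1 : Int) ∈ List.drop il L := by
        by_contra hm; exact hn2 ⟨by omega, by omega, hm⟩
      rw [List.drop_eq_nil_of_le hge]
      simp [List.length_drop, h1, hm]
    · rw [List.drop_eq_nil_of_le hge] at hn2 hn3 ⊢
      simp only [List.not_mem_nil, not_false_iff, and_true] at hn2 hn3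
      simp [List.length_drop]
      omega

theorem edgeB_eq_edgeA (k1 k2 L : List Int) : edgeB k1 k2 L = edgeA k1 k2 L := by
  simpa using edgeBGo_eq_edgeA k1 k2 L 0 0 0

theorem fmaxB_eq_fmaxA (s : List Int) : fmaxB s = fmaxA s := by
  cases s <;> simp [fmaxB, fmaxA, PySem.List.maxD, PySem.List.max?]

-- the returningFalse flag of A's inner loop is the negation of B's `any`
theorem flag_foldl {α : Type} (P : α → Bool) (xs : List α) (rf : Bool) :
    xs.foldl (fun rf x => if P x then false else rf) rf = (rf && !xs.any P) := by
  induction xs generalizing rf with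
  | nil => simp
  | cons x t ih =>
    simp only [List.foldl_cons, List.any_cons, ih]
    cases h : P x <;> simp

-- A's outer loop equals B's all/any comprehension
theorem redGoA_eq (set2 : List (List Int)) (L : List Int) (s1 : List (List Int)) :
    redGoA set2 L s1 = (s1.filter (fun y => !(set2.contains y))).all
      (fun y => set2.any (fun x => (edgeB x y L || edgeB y x L) && decide (fmaxB x ≤ fmaxB y))) := by
  induction s1 with
  | nil => simp [redGoA]
  | cons y rest ih =>
    by_cases hy : y ∈ set2
    · simp [redGoA, hy, ih]
    · have hP : (fun x => ((edgeB x y L || edgeB y x L) && decide (fmaxB x ≤ fmaxB y)))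
          = (fun x => ((edgeA x y L || edgeA y x L) && decide (fmaxA x ≤ fmaxA y))) := by
        funext x
        rw [edgeB_eq_edgeA, edgeB_eq_edgeA, fmaxB_eq_fmaxA, fmaxB_eq_fmaxA]
      have hc : set2.contains y = false := by simpa using hy
      simp only [redGoA, hy, if_false, flag_foldl, Bool.true_and, List.filter_cons, hc,
        Bool.not_false, if_true, List.all_cons, ih, hP]
      cases hq : (set2.any fun x => ((edgeA x y L || edgeA y x L) && decide (fmaxA x ≤ fmaxA y))) <;>
        simp_all


-- ===== VERDICT (by name: the statement is the Claim_ definition above) =====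
theorem reduces_spec : Claim_equal_reduces := by
  intro s1 s2 L _hdom _hpre
  unfold Spec_reduces reduces reduces_alt
  rw [redGoA_eq]
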